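-- pv_equiv track=rewrite | github.com/AlejandroGGUNAM/Criptografia | Inverso Multiplicativo/inverso_multiplicativo.py | encontrar_soluciones
-- ===== SOURCE A (Python) =====
-- def euclides_extendido(a, b):
--     # Caso base: si b es 0, el MCD es a.
--     if b == 0:
--         return a, 1, 0
--
--     # Llamada recursiva usando el algoritmo de Euclides.
--     gcd, x1, y1 = euclides_extendido(b, a % b)
--
--     # Ajuste de coeficientes para cumplir: a*x + b*y = gcd.
--     x = y1
--     y = x1 - (a // b) * y1
--
--     return gcd, x, y
--
-- def inverso_multiplicativo(e, n):
--     # Se obtiene el MCD y el coeficiente asociado a e.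
--     gcd, x, _ = euclides_extendido(e, n)
--
--     # Si el MCD no es 1, no existe inverso modular.
--     if gcd != 1:
--         return None
--
--     return x % n
--
-- def encontrar_soluciones(e, n, cantidad):
--     # Primero se calcula la solución base.
--     inverso_base = inverso_multiplicativo(e, n)
--
--     if inverso_base is None:
--         return None
--
--     soluciones = []
--
--     # Las soluciones se obtienen sumando múltiplos de n.
--     for k in range(cantidad):
--         soluciones.append(inverso_base + k * n)
--
--     return soluciones
-- ===== SOURCE B (Python) =====
-- def encontrar_soluciones(e, n, cantidad):
--     # Iterative extended Euclid: thread (old_r, r) and (old_s, s).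
--     old_r, r = e, n
--     old_s, s = 1, 0
--     while r != 0:
--         q = old_r // r
--         old_r, r = r, old_r - q * r
--         old_s, s = s, old_s - q * s
--     if old_r != 1:
--         return None
--     inverso_base = old_s % n
--     return [inverso_base + k * n for k in range(cantidad)]
-- ===== Notes on version B (the rewrite author's own statement) =====
-- stated objective: idiomatic
-- what changed: Replaced the recursive extended-Euclid helper by an iterative while-loop threading (old_r, r) and (old_s, s) (dropping the unused y coefficient), and built the arithmetic progression with a list comprehension instead of an append loop.
import Mathlib
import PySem

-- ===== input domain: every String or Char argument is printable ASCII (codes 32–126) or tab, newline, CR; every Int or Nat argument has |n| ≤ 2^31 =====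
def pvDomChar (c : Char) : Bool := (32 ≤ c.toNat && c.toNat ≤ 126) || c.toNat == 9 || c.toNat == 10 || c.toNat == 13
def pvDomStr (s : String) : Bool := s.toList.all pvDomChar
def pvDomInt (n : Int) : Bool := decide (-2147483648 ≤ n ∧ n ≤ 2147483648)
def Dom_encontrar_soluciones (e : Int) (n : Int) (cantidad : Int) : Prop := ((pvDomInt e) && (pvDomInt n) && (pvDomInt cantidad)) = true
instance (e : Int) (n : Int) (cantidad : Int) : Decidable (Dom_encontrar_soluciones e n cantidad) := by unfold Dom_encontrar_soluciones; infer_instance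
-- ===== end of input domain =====

-- B replaces A's recursive extended Euclid with an iterative Bezout loop (dropping the
-- unused y-coefficient) and builds the progression with a comprehension (objective: idiomatic).

-- termination helper cited by both ports
theorem pvModNatAbsLt (a b : Int) (hb : b ≠ 0) :
    (PySem.Int.mod a b).natAbs < b.natAbs := by
  rcases lt_or_gt_of_ne hb with h | h
  · have := PySem.Int.mod_neg_bounds a h
    omega
  · have h1 := PySem.Int.mod_nonneg a h
    have h2 := PySem.Int.mod_lt a h
    omega

-- ===== PORT A =====
def euclides_extendido (a b : Int) : Int × Int × Int :=
  if hb : b = 0 then (a, 1, 0)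
  else
    let r := euclides_extendido b (PySem.Int.mod a b)
    let gcd := r.1
    let x1 := r.2.1
    let y1 := r.2.2
    let x := y1
    let y := x1 - (PySem.Int.floordiv a b) * y1
    (gcd, x, y)
termination_by b.natAbs
decreasing_by exact pvModNatAbsLt a b hb

def inverso_multiplicativo (e n : Int) : Option Int :=
  let r := euclides_extendido e n
  if r.1 ≠ 1 then none
  else some (PySem.Int.mod r.2.1 n)

def encontrar_soluciones (e : Int) (n : Int) (cantidad : Int) : Option (List Int) :=
  match inverso_multiplicativo e n with
  | none => none
  | some inverso_base =>
      some ((PySem.List.pyRange 0 cantidad 1).foldl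
        (fun soluciones k => soluciones ++ [inverso_base + k * n]) [])

-- ===== PORT B =====
def pvEgcdLoop (old_r r old_s s : Int) : Int × Int :=
  if hr : r = 0 then (old_r, old_s)
  else
    let q := PySem.Int.floordiv old_r r
    pvEgcdLoop r (old_r - q * r) s (old_s - q * s)
termination_by r.natAbs
decreasing_by
  have h : old_r - PySem.Int.floordiv old_r r * r = PySem.Int.mod old_r r := by
    have := PySem.Int.floordiv_mul_add_mod old_r r
    omega
  simpa [h] using pvModNatAbsLt old_r r hr

def encontrar_soluciones_alt (e : Int) (n : Int) (cantidad : Int) : Option (List Int) :=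
  let p := pvEgcdLoop e n 1 0
  if p.1 ≠ 1 then none
  else
    let inverso_base := PySem.Int.mod p.2 n
    some ((PySem.List.pyRange 0 cantidad 1).map (fun k => inverso_base + k * n))

-- ===== PRECONDITION & SPEC =====
-- Pre_ excludes exactly (e = 1, n = 0), the only inputs where A raises ZeroDivisionError
-- (x % 0 after gcd = 1); B raises there as well.
def Pre_encontrar_soluciones (e : Int) (n : Int) (cantidad : Int) : Prop := ¬ (e = 1 ∧ n = 0)
instance (e : Int) (n : Int) (cantidad : Int) : Decidable (Pre_encontrar_soluciones e n cantidad) := by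
  unfold Pre_encontrar_soluciones; infer_instance
def pvWitness_encontrar_soluciones : Int × Int × Int := (3, 7, 4)

def Spec_encontrar_soluciones (e : Int) (n : Int) (cantidad : Int) (out : Option (List Int)) : Prop := out = encontrar_soluciones_alt e n cantidad
instance (e : Int) (n : Int) (cantidad : Int) (out : Option (List Int)) : Decidable (Spec_encontrar_soluciones e n cantidad out) := by unfold Spec_encontrar_soluciones; infer_instance

-- ===== CLAIM (what is proved, stated in full; the proofs are below) =====
def Claim_equal_encontrar_soluciones : Prop := ∀ (e : Int) (n : Int) (cantidad : Int), Dom_encontrar_soluciones e n cantidad → Pre_encontrar_soluciones e n cantidad → Spec_encontrar_soluciones e n cantidad (encontrar_soluciones e n cantidad)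

-- ===== LEMMAS AND PROOFS =====

-- loop invariant: the iterative Bezout loop computes (gcd, os*x + s*y) of the recursion
theorem pvEgcdLoop_eq (b : Int) : ∀ a os s : Int,
    pvEgcdLoop a b os s =
      ((euclides_extendido a b).1,
       os * (euclides_extendido a b).2.1 + s * (euclides_extendido a b).2.2) := by
  induction b using (fun motive ind b => Nat.strongRecOn (motive := fun n => ∀ b : Int, b.natAbs = n → motive b) b.natAbs (fun n ih b hb => ind b (fun c hc => ih c.natAbs (hb ▸ hc) c rfl)) b rfl :
      ∀ (motive : Int → Prop), (∀ b, (∀ c : Int, c.natAbs < b.natAbs → motive c) → motive b) → ∀ b, motive b) with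
  | _ b ih =>
    intro a os s
    by_cases hb : b = 0
    · subst hb
      rw [pvEgcdLoop, euclides_extendido]
      simp
    · rw [pvEgcdLoop, euclides_extendido]
      simp only [hb, dif_neg, not_false_iff]
      have hmod : a - PySem.Int.floordiv a b * b = PySem.Int.mod a b := by
        have := PySem.Int.floordiv_mul_add_mod a b
        omega
      rw [hmod, ih (PySem.Int.mod a b) (pvModNatAbsLt a b hb) b s
        (os - PySem.Int.floordiv a b * s)]
      simp only [Prod.mk.injEq]
      exact ⟨by trivial, by ring⟩

theorem pvFoldlAppendMap (f : Int → Int) (l : List Int) : ∀ acc : List Int,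
    l.foldl (fun a k => a ++ [f k]) acc = acc ++ l.map f := by
  induction l with
  | nil => intro acc; simp
  | cons x xs ih => intro acc; simp [ih]

-- ===== VERDICT (by name: the statement is the Claim_ definition above) =====
theorem encontrar_soluciones_spec : Claim_equal_encontrar_soluciones := by
  intro e n cantidad _ _
  unfold Spec_encontrar_soluciones encontrar_soluciones encontrar_soluciones_alt
    inverso_multiplicativo
  rw [pvEgcdLoop_eq]
  simp only [one_mul, zero_mul, add_zero]
  by_cases hg : (euclides_extendido e n).1 = 1
  · simp [hg, pvFoldlAppendMap (fun k => PySem.Int.mod (euclides_extendido e n).2.1 n + k * n)]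
  · simp [hg]
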